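-- pv_equiv track=rewrite | github.com/Dimabelegonov/mipt_inf | 1sem/Exam/31. Задача о количестве траекторий Кузнечика на числовой прямой.py | din
-- ===== SOURCE A (Python) =====
-- def din(a):
--     s = [1 if a[0]!=0 else 0]
--     for i in range(1, len(a)):
--         if i == 1:
--             if a[i] != 0:
--                 s.append(s[i - 1])
--             else:
--                 s.append(0)
--         else:
--             if a[i] == 0:
--                 s.append(0)
--             else:
--                 s.append(s[i - 1] + s[i - 2])
--     return s[-1]
-- ===== SOURCE B (Python) =====
-- def din(a):
--     # Linear-algebra formulation: each tail element contributes a 2x2 step matrix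
--     # ([[1,1],[1,0]] if the cell is free, [[0,0],[1,0]] if blocked); fold the product
--     # of these matrices, then apply the accumulated matrix once to the seed vector
--     # (1 if a[0] != 0 else 0, 0).  The count itself is never carried in the loop.
--     p, q, r, s = 1, 0, 0, 1   # accumulated matrix product, starts as identity
--     for x in a[1:]:
--         if x != 0:
--             p, q, r, s = p + r, q + s, p, q
--         else:
--             p, q, r, s = 0, 0, p, q
--     v = (1 if a[0] != 0 else 0, 0)
--     return p * v[0] + q * v[1]
-- ===== Notes on version B (the rewrite author's own statement) =====
-- stated objective: alternative
-- what changed: Replaces the dp-table loop that appends trajectory counts (with a special i==1 case) by the linear-algebra view of the recurrence: each tail element is mapped to a 2x2 step matrix, the loop folds only the matrix product, and the count appears only at the end by applying the accumulated matrix to the seed vector.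
import Mathlib
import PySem

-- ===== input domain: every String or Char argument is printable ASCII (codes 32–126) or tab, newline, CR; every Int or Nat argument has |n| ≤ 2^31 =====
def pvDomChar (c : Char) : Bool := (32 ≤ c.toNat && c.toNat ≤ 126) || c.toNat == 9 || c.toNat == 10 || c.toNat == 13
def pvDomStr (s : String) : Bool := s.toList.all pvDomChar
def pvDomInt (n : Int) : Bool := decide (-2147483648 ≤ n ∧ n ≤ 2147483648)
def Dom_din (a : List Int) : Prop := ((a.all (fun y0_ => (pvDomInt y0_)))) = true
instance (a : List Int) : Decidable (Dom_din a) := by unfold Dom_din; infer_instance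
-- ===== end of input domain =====

-- B recasts the dp recurrence as a fold of 2x2 step matrices applied to a seed vector at the end; return values only (no mutation).

-- ===== PORT A =====
-- indexing of a (first element, and index i with 1 ≤ i < len a) is in range under Pre_din (a ≠ []), so pyGetD is exact there.
def din (a : List Int) : Int :=
  let s0 : List Int := [if PySem.List.pyGetD a 0 0 ≠ 0 then 1 else 0]
  let s := (PySem.List.pyRange 1 a.length 1).foldl (fun s i =>
    if i = 1 then
      if PySem.List.pyGetD a i 0 ≠ 0 then s ++ [PySem.List.pyGetD s (i - 1) 0]
      else s ++ [0]
    else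
      if PySem.List.pyGetD a i 0 = 0 then s ++ [0]
      else s ++ [PySem.List.pyGetD s (i - 1) 0 + PySem.List.pyGetD s (i - 2) 0]) s0
  PySem.List.pyGetD s (-1) 0

-- ===== PORT B =====
-- (p, q, r, s) is the running 2x2 matrix product; the seed vector v is applied once at the end.
def din_alt (a : List Int) : Int :=
  let P := (PySem.List.slice a (some 1) none).foldl
    (fun (m : Int × Int × Int × Int) x =>
      if x ≠ 0 then (m.1 + m.2.2.1, m.2.1 + m.2.2.2, m.1, m.2.1)
      else (0, 0, m.1, m.2.1)) (1, 0, 0, 1)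
  let v : Int × Int := (if PySem.List.pyGetD a 0 0 ≠ 0 then 1 else 0, 0)
  P.1 * v.1 + P.2.1 * v.2

-- ===== PRECONDITION & SPEC =====
-- Pre_din excludes only the empty list, on which Python A raises IndexError reading the first element (B does too).
def Pre_din (a : List Int) : Prop := a ≠ []
instance (a : List Int) : Decidable (Pre_din a) := by unfold Pre_din; infer_instance
def pvWitness_din : List Int := [1]
def Spec_din (a : List Int) (out : Int) : Prop := out = din_alt a
instance (a : List Int) (out : Int) : Decidable (Spec_din a out) := by unfold Spec_din; infer_instance

-- ===== CLAIM (what is proved, stated in full; the proofs are below) =====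
def Claim_equal_din : Prop := ∀ (a : List Int), Dom_din a → Pre_din a → Spec_din a (din a)

-- ===== LEMMAS AND PROOFS =====

-- reference recursion: g p2 p xs = final dp value after processing xs with state (prev2, prev)
def gDin (p2 p : Int) : List Int → Int
  | [] => p
  | x :: xs => gDin p (if x ≠ 0 then p + p2 else 0) xs

-- matrix action on a vector: first and second component of M·(v,w)
def mApp1 (m : Int × Int × Int × Int) (v w : Int) : Int := m.1 * v + m.2.1 * w
def mApp2 (m : Int × Int × Int × Int) (v w : Int) : Int := m.2.2.1 * v + m.2.2.2 * w

-- B's matrix fold computes gDin through the matrix action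
theorem mat_fold (xs : List Int) : ∀ (m : Int × Int × Int × Int) (v w : Int),
    mApp1 (xs.foldl
      (fun (m : Int × Int × Int × Int) x =>
        if x ≠ 0 then (m.1 + m.2.2.1, m.2.1 + m.2.2.2, m.1, m.2.1)
        else (0, 0, m.1, m.2.1)) m) v w
      = gDin (mApp2 m v w) (mApp1 m v w) xs := by
  induction xs with
  | nil => intro m v w; rfl
  | cons x xs ih =>
    intro m v w
    simp only [List.foldl_cons, gDin]
    by_cases h : x = 0
    · rw [if_neg (by simp [h]), if_neg (by simp [h]), ih]
      simp [mApp1, mApp2]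
    · rw [if_pos h, if_pos h, ih]
      simp only [mApp1, mApp2]
      ring_nf

-- invariant for A's loop from index k ≥ 2: the dp list s has length k, last = p, s[k-2] = p2
theorem din_loop_inv (a : List Int) :
    ∀ (m k : Nat) (s : List Int) (p2 p : Int),
      2 ≤ k → s.length = k → a.length = k + m →
      s[k-1]? = some p → s[k-2]? = some p2 →
      PySem.List.pyGetD
        ((PySem.List.pyRange k a.length 1).foldl (fun s i =>
          if i = 1 then
            if PySem.List.pyGetD a i 0 ≠ 0 then s ++ [PySem.List.pyGetD s (i - 1) 0]
            else s ++ [0]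
          else
            if PySem.List.pyGetD a i 0 = 0 then s ++ [0]
            else s ++ [PySem.List.pyGetD s (i - 1) 0 + PySem.List.pyGetD s (i - 2) 0]) s)
        (-1) 0
      = gDin p2 p (a.drop k) := by
  intro m
  induction m with
  | zero =>
    intro k s p2 p hk hs hlen hp hp2
    have hrange : PySem.List.pyRange (k : Int) (a.length : Int) 1 = [] := by
      simp [PySem.List.pyRange, hlen]
    have hdrop : a.drop k = [] := by
      apply List.drop_eq_nil_of_le; omega
    rw [hrange, hdrop]
    simp only [List.foldl_nil, gDin]
    subst hs
    have hne : s ≠ [] := by intro h; rw [h] at hk; simp at hk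
    rw [PySem.List.pyGetD_neg_one s 0 hne, List.getLast_eq_getElem]
    exact Option.some.inj ((List.getElem?_eq_getElem (by omega)).symm.trans hp)
  | succ m ih =>
    intro k s p2 p hk hs hlen hp hp2
    have hklt : k < a.length := by omega
    have hcons : PySem.List.pyRange (k : Int) (a.length : Int) 1
        = (k : Int) :: PySem.List.pyRange ((k : Int) + 1) (a.length : Int) 1 :=
      PySem.List.pyRange_one_cons (by exact_mod_cast hklt)
    rw [hcons]
    simp only [List.foldl_cons]
    have hkne : ((k : Int) ≠ 1) := by omega
    have hai : PySem.List.pyGetD a (k : Int) 0 = a[k] := by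
      rw [PySem.List.pyGetD_natCast]; exact List.getD_eq_getElem a 0 hklt
    have hsub1 : (k : Int) - 1 = ((k - 1 : Nat) : Int) := by omega
    have hsub2 : (k : Int) - 2 = ((k - 2 : Nat) : Int) := by omega
    have hlast : PySem.List.pyGetD s ((k : Int) - 1) 0 = p := by
      rw [hsub1, PySem.List.pyGetD_natCast]
      simp [List.getD, hp]
    have hpen : PySem.List.pyGetD s ((k : Int) - 2) 0 = p2 := by
      rw [hsub2, PySem.List.pyGetD_natCast]
      simp [List.getD, hp2]
    rw [if_neg hkne]
    simp only [hai, hlast, hpen]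
    have hdrop : a.drop k = a[k] :: a.drop (k + 1) := List.drop_eq_getElem_cons hklt
    set c : Int := if a[k] = 0 then 0 else p + p2 with hc
    have hstep : (if a[k] = 0 then s ++ [(0 : Int)] else s ++ [p + p2]) = s ++ [c] := by
      rw [hc]; split_ifs <;> rfl
    rw [hstep]
    have hcast : ((k : Int) + 1) = (((k + 1 : Nat)) : Int) := by omega
    rw [hcast]
    have hlen' : (s ++ [c]).length = k + 1 := by simp [hs]
    have hlast' : (s ++ [c])[(k+1)-1]? = some c := by
      simp [hlen', hs]
    have hpen' : (s ++ [c])[(k+1)-2]? = some p := by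
      have : k + 1 - 2 = k - 1 := by omega
      rw [this, List.getElem?_append_left (by omega)]
      exact hp
    have := ih (k + 1) (s ++ [c]) p c (by omega) hlen' (by omega) hlast' hpen'
    rw [this, hdrop]
    simp only [gDin]
    congr 1
    rw [hc]; by_cases h : a[k] = 0 <;> simp [h]

-- B through the matrix-fold lemma: din_alt (x :: t) = gDin 0 d0 t
theorem din_alt_eq_gDin (x : Int) (t : List Int) :
    din_alt (x :: t) = gDin 0 (if x ≠ 0 then 1 else 0) (x :: t).tail := by
  unfold din_alt
  rw [PySem.List.slice_from_one]
  simp only [List.tail_cons, PySem.List.pyGetD_zero_cons]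
  have h := mat_fold t (1, 0, 0, 1) (if x ≠ 0 then 1 else 0) 0
  simp only [mApp1, mApp2] at h
  simpa using h

theorem din_spec_aux (a : List Int) (h : a ≠ []) : din a = din_alt a := by
  obtain ⟨x, t⟩ := List.exists_cons_of_ne_nil h
  obtain ⟨t, rfl⟩ := t
  set d0 : Int := if x ≠ 0 then 1 else 0 with hd0
  have ha0 : PySem.List.pyGetD (x :: t) 0 0 = x := PySem.List.pyGetD_zero_cons x t 0
  rw [din_alt_eq_gDin, ← hd0]
  cases t with
  | nil =>
    simp [din, PySem.List.pyRange, PySem.List.pyGetD_neg_one, gDin, ha0, ← hd0]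
  | cons y r =>
    -- A side: peel off the i = 1 iteration, then use the loop invariant from k = 2
    have hlen : (x :: y :: r).length = 2 + r.length := by
      simp only [List.length_cons]; omega
    have hcons : PySem.List.pyRange 1 ((x :: y :: r).length : Int) 1
        = 1 :: PySem.List.pyRange 2 ((x :: y :: r).length : Int) 1 := by
      have h1 : (1 : Int) < ((x :: y :: r).length : Int) := by
        simp only [List.length_cons]; push_cast; omega
      have := PySem.List.pyRange_one_cons (a := 1) (b := ((x :: y :: r).length : Int)) h1
      simpa using this
    set d1 : Int := if y ≠ 0 then d0 else 0 with hd1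
    have hstepA : din (x :: y :: r) = PySem.List.pyGetD
        ((PySem.List.pyRange 2 ((x :: y :: r).length : Int) 1).foldl (fun s i =>
          if i = 1 then
            if PySem.List.pyGetD (x :: y :: r) i 0 ≠ 0 then s ++ [PySem.List.pyGetD s (i - 1) 0]
            else s ++ [0]
          else
            if PySem.List.pyGetD (x :: y :: r) i 0 = 0 then s ++ [0]
            else s ++ [PySem.List.pyGetD s (i - 1) 0 + PySem.List.pyGetD s (i - 2) 0])
          [d0, d1]) (-1) 0 := by
      unfold din
      rw [hcons]
      simp only [List.foldl_cons, ha0]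
      congr 2
      have hy : PySem.List.pyGetD (x :: y :: r) (1 : Int) 0 = y := by
        have : ((1 : Nat) : Int) = (1 : Int) := by norm_num
        rw [← this, PySem.List.pyGetD_natCast]; rfl
      have hs0 : PySem.List.pyGetD [d0] ((1 : Int) - 1) 0 = d0 := by
        norm_num [PySem.List.pyGetD_zero_cons]
      rw [hy, hs0]
      split_ifs <;> simp_all
    have hinv := din_loop_inv (x :: y :: r) r.length 2 [d0, d1] d0 d1
      (by omega) (by simp) (by simpa using hlen) (by simp) (by simp)
    simp only [Nat.cast_ofNat] at hinv
    rw [hstepA, hinv]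
    -- both sides reduce to gDin d0 d1 r
    simp only [List.tail_cons, gDin]
    congr 1
    rw [hd1]; split_ifs <;> simp

-- ===== VERDICT (by name: the statement is the Claim_ definition above) =====
theorem din_spec : Claim_equal_din := by
  intro a _ hpre
  exact din_spec_aux a hpre
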